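-- pv_equiv track=rewrite | github.com/hao-ai-lab/distca | d2/planner/equal_flops.py | postprocess_items
-- ===== SOURCE A (Python) =====
-- from collections import defaultdict
--
-- def postprocess_items(items) -> list[dict]:
--     """
--     Postprocess the items to add a "shard_id" field.
--     The "shard_id" field is always 0 for the original sequence.
--     For each non-original sequence, shard_id = how short the `kv` is among all the shards in the same sequence (ranking of `kv` sort ASC)
--     - collect all the sequences that has the same `src_gpuid` and `seqid`
--     - sort them by the `kv` to determine the shard id of that sequence.
--     """
--     from copy import deepcopy
--     items = deepcopy(items)
--
--     for item in items:
--         if item["is_original"]: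
--             item["shard_id"] = 0
--
--     # now handle the non-original sequences.
--     non_original_items = [item for item in items if not item["is_original"]]
--     src_gpuid_seqid_to_items = defaultdict(list)
--     for item in non_original_items:
--         src_gpuid_seqid_to_items[(item["src_gpuid"], item["seqid"])].append(item)
--
--     for src_gpuid_seqid, items_ in src_gpuid_seqid_to_items.items():
--         items_.sort(key=lambda x: x["kv"])
--         for i, item in enumerate(items_):
--             item["shard_id"] = i
--     return items
-- ===== SOURCE B (Python) =====
-- from collections import defaultdict
--
--
-- def postprocess_items(items) -> list[dict]:
--     """Same result as A, by a different decomposition: one pass splits originals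
--     from shards, ONE global stable sort by `kv` replaces the per-group sorts, and
--     a counting pass over the sorted list hands out shard ids per (src_gpuid, seqid)."""
--     from copy import deepcopy
--     items = deepcopy(items)
--
--     shards = []
--     for item in items:
--         if item["is_original"]:
--             item["shard_id"] = 0
--         else:
--             shards.append(item)
--
--     shards.sort(key=lambda x: x["kv"])  # stable: ties keep original order
--
--     counter = defaultdict(int)
--     for item in shards:
--         key = (item["src_gpuid"], item["seqid"])
--         item["shard_id"] = counter[key]
--         counter[key] += 1
--     return items
-- ===== Notes on version B (the rewrite author's own statement) =====
-- stated objective: alternative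
-- what changed: A groups the non-original items into a defaultdict of lists and stable-sorts each group by 'kv' separately; B does ONE global stable sort of all non-original items by 'kv' and then assigns shard ids in a single counting pass with a per-(src_gpuid, seqid) counter.
import Mathlib
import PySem

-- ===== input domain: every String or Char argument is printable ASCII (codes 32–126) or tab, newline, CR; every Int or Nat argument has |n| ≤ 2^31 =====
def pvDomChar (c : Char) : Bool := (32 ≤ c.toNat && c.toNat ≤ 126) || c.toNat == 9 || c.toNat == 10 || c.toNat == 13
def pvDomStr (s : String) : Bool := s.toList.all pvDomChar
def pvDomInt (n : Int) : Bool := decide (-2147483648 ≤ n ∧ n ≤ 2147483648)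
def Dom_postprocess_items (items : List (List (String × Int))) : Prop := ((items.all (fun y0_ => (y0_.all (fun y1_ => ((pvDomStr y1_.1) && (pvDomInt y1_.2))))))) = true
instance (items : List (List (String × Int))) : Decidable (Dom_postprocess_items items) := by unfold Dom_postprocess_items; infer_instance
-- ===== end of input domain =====

-- B replaces A's group-dict-of-lists plus per-group sorts by ONE global stable sort on `kv`
-- and a counting pass; proved to return the same list. (Python A/B copy their input; no mutation.)

-- ===== PORT A =====
-- item["k"] (Pre_ guarantees the key is present wherever A reads one)
def pvGet (d : List (String × Int)) (k : String) : Int :=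
  match d with
  | [] => 0
  | (k', v) :: t => if k' = k then v else pvGet t k

-- item["k"] = v  (dict assignment: overwrite in place, new keys append)
def pvSet (d : List (String × Int)) (k : String) (v : Int) : List (String × Int) :=
  match d with
  | [] => [(k, v)]
  | (k', v') :: t => if k' = k then (k, v) :: t else (k', v') :: pvSet t k v

-- first-match lookup in a (position, shard) assignment list (models writing back
-- through Python's aliasing: each mutated dict is identified by its list position)
def pvLook (a : List (Nat × Int)) (i : Nat) : Option Int :=
  match a with
  | [] => none
  | (j, s) :: t => if j = i then some s else pvLook t i

-- (item["src_gpuid"], item["seqid"])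
def pvKey (p : List (String × Int) × Nat) : Int × Int := (pvGet p.1 "src_gpuid", pvGet p.1 "seqid")

def postprocess_items (items : List (List (String × Int))) : List (List (String × Int)) :=
  -- deepcopy + first loop: originals get shard_id = 0
  let items1 := items.map (fun it => if pvGet it "is_original" ≠ 0 then pvSet it "shard_id" 0 else it)
  -- non_original_items = [item for item in items if not item["is_original"]]  (positions model aliasing)
  let non := items1.zipIdx.filter (fun p => pvGet p.1 "is_original" == 0)
  -- src_gpuid_seqid_to_items : defaultdict(list)
  let groups := non.foldl (fun d p => d.modify (pvKey p) [] (· ++ [p]))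
      (PySem.Dict.empty : PySem.Dict (Int × Int) (List (List (String × Int) × Nat)))
  -- for each group (dict order): items_.sort(key=kv); for i, item in enumerate(items_): item["shard_id"] = i
  let assigns := groups.items.foldl (fun acc g =>
      acc ++ (PySem.List.enumerate (PySem.List.sorted g.2 (fun p => pvGet p.1 "kv") false)).map
        (fun q => (q.2.2, q.1))) []
  items1.zipIdx.map (fun p => match pvLook assigns p.2 with
    | some s => pvSet p.1 "shard_id" s
    | none => p.1)

-- ===== PORT B =====
def postprocess_items_alt (items : List (List (String × Int))) : List (List (String × Int)) :=
  -- shards = the non-original items (positions model aliasing)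
  let shards := items.zipIdx.filter (fun p => pvGet p.1 "is_original" == 0)
  -- shards.sort(key=lambda x: x["kv"])  — ONE global stable sort
  let snon := PySem.List.sorted shards (fun p => pvGet p.1 "kv") false
  -- counting pass: item["shard_id"] = counter[key]; counter[key] += 1
  let assigns := (snon.foldl
      (fun (st : PySem.Dict (Int × Int) Int × List (Nat × Int)) p =>
        (st.1.modify (pvKey p) 0 (· + 1), st.2 ++ [(p.2, st.1.getD (pvKey p) 0)]))
      (PySem.Dict.empty, [])).2
  -- originals get shard_id = 0 in B's first loop; write everything back
  items.zipIdx.map (fun p =>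
    if pvGet p.1 "is_original" ≠ 0 then pvSet p.1 "shard_id" 0
    else match pvLook assigns p.2 with
      | some s => pvSet p.1 "shard_id" s
      | none => p.1)

-- ===== PRECONDITION & SPEC =====
-- Pre_ excludes exactly the inputs where Python A raises KeyError: an item without
-- "is_original", or a non-original item missing "src_gpuid", "seqid" or "kv".
def Pre_postprocess_items (items : List (List (String × Int))) : Prop :=
  ∀ it ∈ items, "is_original" ∈ it.map Prod.fst ∧
    (it.lookup "is_original" = some 0 →
      "src_gpuid" ∈ it.map Prod.fst ∧ "seqid" ∈ it.map Prod.fst ∧ "kv" ∈ it.map Prod.fst)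
instance (items : List (List (String × Int))) : Decidable (Pre_postprocess_items items) := by
  unfold Pre_postprocess_items; infer_instance

def pvWitness_postprocess_items : (List (List (String × Int))) :=
  [[("is_original", 1)], [("is_original", 0), ("src_gpuid", 0), ("seqid", 1), ("kv", 3)],
   [("is_original", 0), ("src_gpuid", 0), ("seqid", 1), ("kv", 2)]]

def Spec_postprocess_items (items : List (List (String × Int))) (out : List (List (String × Int))) : Prop := out = postprocess_items_alt items
instance (items : List (List (String × Int))) (out : List (List (String × Int))) : Decidable (Spec_postprocess_items items out) := by unfold Spec_postprocess_items; infer_instance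

-- ===== CLAIM (what is proved, stated in full; the proofs are below) =====
def Claim_equal_postprocess_items : Prop := ∀ (items : List (List (String × Int))), Dom_postprocess_items items → Pre_postprocess_items items → Spec_postprocess_items items (postprocess_items items)

-- ===== LEMMAS AND PROOFS =====
-- proof-side helpers: the two assignment lists seen through first-match lookup
def lookCnt (l : List (List (String × Int) × Nat)) (c : Int) (i : Nat) : Option Int :=
  match l with
  | [] => none
  | x :: t => if x.2 = i then some c else lookCnt t (c + 1) i

def annB (l : List (List (String × Int) × Nat)) (d : PySem.Dict (Int × Int) Int) : List (Nat × Int) :=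
  match l with
  | [] => []
  | p :: t => (p.2, d.getD (pvKey p) 0) :: annB t (d.modify (pvKey p) 0 (· + 1))

theorem pvGet_pvSet_ne (d : List (String × Int)) (k k' : String) (v : Int) (h : k' ≠ k) :
    pvGet (pvSet d k v) k' = pvGet d k' := by
  induction d with
  | nil =>
    simp only [pvSet, pvGet]
    rw [if_neg (fun e => h e.symm)]
  | cons p t ih =>
    obtain ⟨k1, v1⟩ := p
    by_cases hk : k1 = k
    · subst hk
      have h1 : pvSet ((k1, v1) :: t) k1 v = (k1, v) :: t := by simp [pvSet]
      rw [h1]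
      simp only [pvGet]
      rw [if_neg (fun e => h e.symm), if_neg (fun e => h e.symm)]
    · simp only [pvSet, if_neg hk, pvGet]
      by_cases h1 : k1 = k'
      · rw [if_pos h1, if_pos h1]
      · rw [if_neg h1, if_neg h1, ih]

theorem filter_map_orig (l : List (List (String × Int) × Nat)) :
    (l.map (fun p => (if pvGet p.1 "is_original" ≠ 0 then pvSet p.1 "shard_id" 0 else p.1, p.2))).filter
        (fun p => pvGet p.1 "is_original" == 0) =
      l.filter (fun p => pvGet p.1 "is_original" == 0) := by
  induction l with
  | nil => rfl
  | cons p t ih =>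
    simp only [List.map_cons]
    by_cases h : pvGet p.1 "is_original" = 0
    · have he : ((if pvGet p.1 "is_original" ≠ 0 then pvSet p.1 "shard_id" 0 else p.1), p.2) = p := by
        rw [if_neg (by simp [h])]
      rw [he, List.filter_cons, List.filter_cons, ih]
    · rw [if_pos h]
      have hg : pvGet (pvSet p.1 "shard_id" 0) "is_original" = pvGet p.1 "is_original" :=
        pvGet_pvSet_ne _ _ _ _ (by decide)
      rw [List.filter_cons_of_neg (by simp [hg, h]), List.filter_cons_of_neg (by simp [h]), ih]

theorem pvLook_append (a b : List (Nat × Int)) (i : Nat) :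
    pvLook (a ++ b) i = (pvLook a i).or (pvLook b i) := by
  induction a with
  | nil => rfl
  | cons p t ih =>
    by_cases h : p.1 = i
    · simp [pvLook, h]
    · simp [pvLook, h, ih]

theorem pvLook_enum (g : List (List (String × Int) × Nat)) (n : Int) (i : Nat) :
    pvLook ((PySem.List.enumerate g n).map (fun q => (q.2.2, q.1))) i = lookCnt g n i := by
  induction g generalizing n with
  | nil => rfl
  | cons p t ih =>
    by_cases h : p.2 = i
    · simp [PySem.List.enumerate, pvLook, lookCnt, h]
    · simp [PySem.List.enumerate, pvLook, lookCnt, h, ih]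

theorem foldB (l : List (List (String × Int) × Nat)) (st : PySem.Dict (Int × Int) Int × List (Nat × Int)) :
    (l.foldl (fun st p => (st.1.modify (pvKey p) 0 (· + 1), st.2 ++ [(p.2, st.1.getD (pvKey p) 0)])) st).2 =
      st.2 ++ annB l st.1 := by
  induction l generalizing st with
  | nil => simp [annB]
  | cons p t ih => simp [annB, ih]

theorem pvLook_none_of_all (a : List (Nat × Int)) (i : Nat) (h : ∀ e ∈ a, e.1 ≠ i) :
    pvLook a i = none := by
  induction a with
  | nil => rfl
  | cons p t ih =>
    simp only [pvLook]
    rw [if_neg (h p (by simp))]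
    exact ih (fun e he => h e (by simp [he]))

theorem pvLook_annB (l : List (List (String × Int) × Nat)) (d : PySem.Dict (Int × Int) Int)
    (i : Nat) (k0 : Int × Int) (h : ∀ x ∈ l, x.2 = i → pvKey x = k0) :
    pvLook (annB l d) i = lookCnt (l.filter (fun x => pvKey x == k0)) (d.getD k0 0) i := by
  induction l generalizing d with
  | nil => rfl
  | cons p t ih =>
    have hstep : annB (p :: t) d =
        (p.2, d.getD (pvKey p) 0) :: annB t (d.modify (pvKey p) 0 (· + 1)) := rfl
    by_cases hp : p.2 = i
    · have hk := h p (List.mem_cons_self) hp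
      rw [hstep, List.filter_cons_of_pos (by simp [hk])]
      simp only [pvLook, lookCnt]
      rw [if_pos hp, if_pos hp, hk]
    · by_cases hk : pvKey p = k0
      · have hcnt : (d.modify (pvKey p) 0 (· + 1)).getD k0 0 = d.getD k0 0 + 1 := by
          rw [hk, PySem.Dict.getD_modify_self]
        rw [hstep, List.filter_cons_of_pos (by simp [hk])]
        simp only [pvLook, lookCnt]
        rw [if_neg hp, if_neg hp,
          ih _ (fun x hx hxe => h x (List.mem_cons_of_mem _ hx) hxe), hcnt]
      · have hcnt : (d.modify (pvKey p) 0 (· + 1)).getD k0 0 = d.getD k0 0 := by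
          rw [PySem.Dict.getD_modify, if_neg (fun hh => hk hh.symm)]
        rw [hstep, List.filter_cons_of_neg (by simp [hk])]
        simp only [pvLook]
        rw [if_neg hp, ih _ (fun x hx hxe => h x (List.mem_cons_of_mem _ hx) hxe), hcnt]

theorem insertBy_pairwise {α : Type} (key : α → Int) (x : α) (acc : List α)
    (h : acc.Pairwise (fun a b => key a ≤ key b)) :
    (PySem.List.insertBy (fun a b => decide (key a < key b)) x acc).Pairwise (fun a b => key a ≤ key b) := by
  induction acc with
  | nil =>
    show (([x] : List α)).Pairwise (fun a b => key a ≤ key b)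
    simp
  | cons y t ih =>
    rcases List.pairwise_cons.mp h with ⟨hy, ht⟩
    simp only [PySem.List.insertBy]
    by_cases hlt : key x < key y
    · rw [if_pos (by simpa using hlt)]
      refine List.pairwise_cons.mpr ⟨?_, h⟩
      intro b hb
      rcases List.mem_cons.mp hb with hb | hb
      · subst hb; exact le_of_lt hlt
      · exact le_trans (le_of_lt hlt) (hy b hb)
    · rw [if_neg (by simpa using hlt)]
      refine List.pairwise_cons.mpr ⟨?_, ih ht⟩
      intro b hb
      rcases (PySem.List.mem_insertBy _ _ _ _).mp hb with hb | hb
      · subst hb; exact not_lt.mp hlt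
      · exact hy b hb

theorem filter_insertBy {α : Type} (key : α → Int) (P : α → Bool) (x : α) (acc : List α)
    (h : acc.Pairwise (fun a b => key a ≤ key b)) :
    (PySem.List.insertBy (fun a b => decide (key a < key b)) x acc).filter P =
      if P x then PySem.List.insertBy (fun a b => decide (key a < key b)) x (acc.filter P)
      else acc.filter P := by
  induction acc with
  | nil =>
    show (([x] : List α)).filter P = _
    by_cases hP : P x <;> simp [PySem.List.insertBy, hP]
  | cons y t ih =>
    rcases List.pairwise_cons.mp h with ⟨hy, ht⟩
    simp only [PySem.List.insertBy]
    by_cases hlt : key x < key y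
    · rw [if_pos (by simpa using hlt)]
      by_cases hP : P x
      · rw [if_pos hP, List.filter_cons_of_pos hP]
        have hrhs : PySem.List.insertBy (fun a b => decide (key a < key b)) x ((y :: t).filter P) =
            x :: (y :: t).filter P := by
          cases hf : (y :: t).filter P with
          | nil => simp [PySem.List.insertBy]
          | cons z zs =>
            have hz : z ∈ (y :: t).filter P := by rw [hf]; exact List.mem_cons_self
            have hzk : key x < key z := by
              rcases List.mem_cons.mp (List.mem_of_mem_filter hz) with hz' | hz'
              · rw [hz']; exact hlt
              · exact lt_of_lt_of_le hlt (hy z hz')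
            simp only [PySem.List.insertBy]
            rw [if_pos (by simpa using hzk), ← hf]
        rw [hrhs]
      · rw [if_neg hP, List.filter_cons_of_neg hP]
    · rw [if_neg (by simpa using hlt)]
      by_cases hPy : P y
      · rw [List.filter_cons_of_pos hPy, ih ht]
        by_cases hP : P x
        · rw [if_pos hP, if_pos hP, List.filter_cons_of_pos hPy]
          simp only [PySem.List.insertBy]
          rw [if_neg (by simpa using hlt)]
        · rw [if_neg hP, if_neg hP, List.filter_cons_of_pos hPy]
      · rw [List.filter_cons_of_neg hPy, ih ht]
        by_cases hP : P x
        · rw [if_pos hP, if_pos hP, List.filter_cons_of_neg hPy]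
        · rw [if_neg hP, if_neg hP, List.filter_cons_of_neg hPy]

theorem filter_sorted {α : Type} (key : α → Int) (P : α → Bool) (xs : List α) :
    (PySem.List.sorted xs key false).filter P = PySem.List.sorted (xs.filter P) key false := by
  rw [PySem.List.sorted_eq_foldl_insertBy, PySem.List.sorted_eq_foldl_insertBy]
  suffices h : ∀ (l : List α) (acc : List α), acc.Pairwise (fun a b => key a ≤ key b) →
      (l.foldl (fun acc x => PySem.List.insertBy (fun a b => decide (key a < key b)) x acc) acc).filter P =
      (l.filter P).foldl (fun acc x => PySem.List.insertBy (fun a b => decide (key a < key b)) x acc) (acc.filter P) by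
    simpa using h xs [] (by simp)
  intro l
  induction l with
  | nil => intro acc _; rfl
  | cons x t ih =>
    intro acc hacc
    simp only [List.foldl_cons, List.filter_cons]
    by_cases hP : P x
    · simp only [hP, if_pos]
      rw [ih _ (insertBy_pairwise key x acc hacc), filter_insertBy key P x acc hacc, if_pos hP]
      simp
    · simp only [hP]
      rw [ih _ (insertBy_pairwise key x acc hacc), filter_insertBy key P x acc hacc, if_neg (by simp [hP])]
      simp

theorem pvLook_flatMap_none {κ : Type} (ks : List κ) (bl : κ → List (Nat × Int)) (i : Nat)
    (h : ∀ k ∈ ks, pvLook (bl k) i = none) : pvLook (ks.flatMap bl) i = none := by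
  induction ks with
  | nil => rfl
  | cons k t ih =>
    rw [List.flatMap_cons, pvLook_append, h k (by simp), ih (fun k hk => h k (by simp [hk]))]
    rfl

theorem pvLook_flatMap_unique {κ : Type} [DecidableEq κ] (ks : List κ) (bl : κ → List (Nat × Int))
    (i : Nat) (k0 : κ) (hnd : ks.Nodup) (hmem : k0 ∈ ks)
    (h : ∀ k ∈ ks, k ≠ k0 → pvLook (bl k) i = none) :
    pvLook (ks.flatMap bl) i = pvLook (bl k0) i := by
  induction ks with
  | nil => simp at hmem
  | cons k t ih =>
    rcases List.nodup_cons.mp hnd with ⟨hk, hnd'⟩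
    by_cases hke : k = k0
    · subst hke
      rw [List.flatMap_cons, pvLook_append,
        pvLook_flatMap_none t bl i (fun k' hk' => h k' (by simp [hk']) (fun he => hk (he ▸ hk'))),
        Option.or_none]
    · rcases List.mem_cons.mp hmem with hm | hm
      · exact absurd hm.symm hke
      · rw [List.flatMap_cons, pvLook_append, h k (by simp) hke]
        exact ih hnd' hm (fun k' hk' => h k' (by simp [hk']))

theorem lookCnt_none (l : List (List (String × Int) × Nat)) (c : Int) (i : Nat)
    (h : ∀ x ∈ l, x.2 ≠ i) : lookCnt l c i = none := by
  induction l generalizing c with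
  | nil => rfl
  | cons p t ih =>
    simp only [lookCnt]
    rw [if_neg (h p List.mem_cons_self)]
    exact ih _ (fun x hx => h x (List.mem_cons_of_mem _ hx))

theorem posdet (items : List (List (String × Int))) (y z : List (String × Int) × Nat)
    (hy : y ∈ items.zipIdx) (hz : z ∈ items.zipIdx) (he : y.2 = z.2) : y = z := by
  obtain ⟨a, i⟩ := y; obtain ⟨b, j⟩ := z
  simp only at he; subst he
  have h1 := List.mem_zipIdx hy
  have h2 := List.mem_zipIdx hz
  rw [h1.2.2, h2.2.2]

theorem mem_block (g : List (List (String × Int) × Nat)) (e : Nat × Int)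
    (he : e ∈ (PySem.List.enumerate (PySem.List.sorted g (fun p => pvGet p.1 "kv") false)).map
      (fun q => (q.2.2, q.1))) : ∃ y ∈ g, e.1 = y.2 := by
  rcases List.mem_map.mp he with ⟨q, hq, hqe⟩
  rcases (PySem.List.mem_enumerate_iff _ _ _).mp hq with ⟨k, hk, hqk⟩
  refine ⟨q.2, ?_, ?_⟩
  · exact (PySem.List.mem_sorted _ _ _ _).mp (by rw [hqk]; exact List.getElem_mem hk)
  · rw [← hqe]

theorem groups_getD (l : List (List (String × Int) × Nat)) (k : Int × Int) :
    (l.foldl (fun d p => d.modify (pvKey p) [] (· ++ [p])) PySem.Dict.empty).getD k [] =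
      l.filter (fun p => pvKey p == k) := by
  have h1 : l.foldl (fun d p => d.modify (pvKey p) [] (· ++ [p])) PySem.Dict.empty
      = (l.map (fun p => (pvKey p, p))).foldl (fun d q => d.modify q.1 [] (· ++ [q.2]))
          PySem.Dict.empty := by
    rw [List.foldl_map]
  rw [h1, PySem.Dict.getD_foldl_modify_append]
  simp [List.filter_map, Function.comp_def]

theorem groups_keys (l : List (List (String × Int) × Nat)) :
    (l.foldl (fun d p => d.modify (pvKey p) [] (· ++ [p])) PySem.Dict.empty).keys =
      PySem.Set.update
        (PySem.Dict.empty : PySem.Dict (Int × Int) (List (List (String × Int) × Nat))).keys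
        (l.map pvKey) :=
  PySem.Dict.keys_foldl_modify_key l pvKey [] (fun _ p => (· ++ [p])) _

theorem lookAB (non : List (List (String × Int) × Nat)) (i : Nat)
    (hdet : ∀ y ∈ non, ∀ z ∈ non, y.2 = z.2 → y = z)
    (k0 : Int × Int)
    (hki : ∀ y ∈ non, y.2 = i → pvKey y = k0) :
    pvLook ((non.foldl (fun d p => d.modify (pvKey p) [] (· ++ [p])) PySem.Dict.empty).items.foldl
        (fun acc g => acc ++ (PySem.List.enumerate (PySem.List.sorted g.2 (fun p => pvGet p.1 "kv") false)).map
          (fun q => (q.2.2, q.1))) []) i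
      = pvLook (annB (PySem.List.sorted non (fun p => pvGet p.1 "kv") false) PySem.Dict.empty) i := by
  have hnd : (non.foldl (fun d p => d.modify (pvKey p) [] (· ++ [p])) PySem.Dict.empty).keys.Nodup :=
    PySem.Dict.nodup_keys_foldl_modify_key non pvKey [] (fun _ p => (· ++ [p])) _
      PySem.Dict.nodup_keys_empty
  -- A side: a flatMap over the (nodup) group keys
  rw [PySem.Dict.items_eq_map_keys _ hnd [], List.foldl_map, PySem.List.foldl_append_eq_flatMap,
    List.nil_append]
  -- B side: lookCnt on the filtered global sort
  have hsnon : ∀ y ∈ PySem.List.sorted non (fun p => pvGet p.1 "kv") false, y.2 = i → pvKey y = k0 :=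
    fun y hy => hki y ((PySem.List.mem_sorted _ _ _ _).mp hy)
  rw [pvLook_annB _ _ _ _ hsnon, PySem.Dict.getD_empty,
    filter_sorted (fun p => pvGet p.1 "kv") (fun x => pvKey x == k0) non]
  by_cases hex : ∃ y ∈ non, y.2 = i
  · rcases hex with ⟨y0, hy0, hy0i⟩
    have hk0 : k0 ∈ (non.foldl (fun d p => d.modify (pvKey p) [] (· ++ [p])) PySem.Dict.empty).keys := by
      rw [groups_keys]
      exact (PySem.Set.mem_update _ _ _).mpr (Or.inr (by
        rw [← hki y0 hy0 hy0i]; exact List.mem_map_of_mem hy0))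
    rw [pvLook_flatMap_unique _ _ i k0 hnd hk0 ?_]
    · rw [groups_getD, pvLook_enum]
    · intro k hk hkne
      apply pvLook_none_of_all
      intro e he
      rcases mem_block _ _ he with ⟨y, hy, hey⟩
      have hy2 : y ∈ non.filter (fun p => pvKey p == k) := by simpa [groups_getD] using hy
      have hyf := List.mem_filter.mp hy2
      intro hei
      have hyy0 : y = y0 := hdet y hyf.1 y0 hy0 (by rw [← hey, hei, hy0i])
      have h1 : pvKey y = k := by simpa using hyf.2
      exact hkne (by rw [← h1, hyy0, hki y0 hy0 hy0i])
  · -- no element of non sits at position i: both sides are none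
    have hB : lookCnt (PySem.List.sorted (non.filter (fun x => pvKey x == k0))
        (fun p => pvGet p.1 "kv") false) 0 i = none := by
      apply lookCnt_none
      intro x hx hxi
      have hx1 := (PySem.List.mem_sorted _ _ _ _).mp hx
      exact hex ⟨x, (List.mem_filter.mp hx1).1, hxi⟩
    have hA : pvLook (((non.foldl (fun d p => d.modify (pvKey p) [] (· ++ [p]))
        PySem.Dict.empty).keys).flatMap (fun k =>
          (PySem.List.enumerate (PySem.List.sorted
            (k, (non.foldl (fun d p => d.modify (pvKey p) [] (· ++ [p])) PySem.Dict.empty).getD k []).2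
            (fun p => pvGet p.1 "kv") false)).map (fun q => (q.2.2, q.1)))) i = none := by
      apply pvLook_flatMap_none
      intro k hk
      apply pvLook_none_of_all
      intro e he
      rcases mem_block _ _ he with ⟨y, hy, hey⟩
      have hy2 : y ∈ non.filter (fun p => pvKey p == k) := by simpa [groups_getD] using hy
      exact fun hei => hex ⟨y, (List.mem_filter.mp hy2).1, by rw [← hey]; exact hei⟩
    rw [hA, hB]

-- ===== VERDICT (by name: the statement is the Claim_ definition above) =====
theorem postprocess_items_spec : Claim_equal_postprocess_items := by
  unfold Claim_equal_postprocess_items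
  intro items _ _
  unfold Spec_postprocess_items
  simp only [postprocess_items, postprocess_items_alt]
  rw [List.zipIdx_map,
    show (Prod.map (fun it => if pvGet it "is_original" ≠ 0 then pvSet it "shard_id" 0 else it)
      (id : Nat → Nat)) = (fun p => ((if pvGet p.1 "is_original" ≠ 0 then pvSet p.1 "shard_id" 0 else p.1), p.2)) from rfl,
    filter_map_orig, List.map_map, foldB, List.nil_append]
  apply List.map_congr_left
  intro p hp
  obtain ⟨it, i⟩ := p
  simp only [Function.comp]
  have hki : ∀ y ∈ items.zipIdx.filter (fun p => pvGet p.1 "is_original" == 0),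
      y.2 = i → pvKey y = pvKey (it, i) := by
    intro y hy hyi
    rw [posdet items y (it, i) (List.mem_filter.mp hy).1 hp hyi]
  have hdet : ∀ y ∈ items.zipIdx.filter (fun p => pvGet p.1 "is_original" == 0),
      ∀ z ∈ items.zipIdx.filter (fun p => pvGet p.1 "is_original" == 0), y.2 = z.2 → y = z := by
    intro y hy z hz
    exact posdet items y z (List.mem_filter.mp hy).1 (List.mem_filter.mp hz).1
  have hlook := lookAB (items.zipIdx.filter (fun p => pvGet p.1 "is_original" == 0)) i hdet
    (pvKey (it, i)) hki
  by_cases h0 : pvGet it "is_original" = 0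
  · rw [hlook]
    simp [h0]
  · have hnone : pvLook (annB (PySem.List.sorted
        (items.zipIdx.filter (fun p => pvGet p.1 "is_original" == 0))
        (fun p => pvGet p.1 "kv") false) PySem.Dict.empty) i = none := by
      rw [pvLook_annB _ _ _ _ (fun y hy => hki y ((PySem.List.mem_sorted _ _ _ _).mp hy)),
        PySem.Dict.getD_empty]
      apply lookCnt_none
      intro x hx hxi
      have hx1 := List.mem_filter.mp ((PySem.List.mem_sorted _ _ _ _).mp (List.mem_of_mem_filter hx))
      have := posdet items x (it, i) hx1.1 hp hxi
      rw [this] at hx1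
      exact h0 (by simpa using hx1.2)
    rw [hlook, hnone]
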